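-- pv_equiv track=rewrite | github.com/grasshopperTrainer/coding_practice | baekjoon/accepted/17825 주사위 윷놀이.py | normalize_pos
-- ===== SOURCE A (Python) =====
-- GRAPHS = [[0, 2, 4, 6, 8, 10, 12, 14, 16, 18, 20, 22, 24, 26, 28, 30, 32, 34, 36, 38, 40, 0],
--           [10, 13, 16, 19],
--           [20, 22, 24],
--           [30, 28, 27, 26],
--           [25, 30, 35]]
--
-- def normalize_pos(pos, graph_idx):
--     if graph_idx == 0:
--         if pos in (5, 10, 15):
--             new_horse = 0, {5: 1, 10: 2, 15: 3}[pos]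
--         elif 21 <= pos:
--             new_horse = 21, 0
--         else:
--             new_horse = pos, 0
--     elif graph_idx in (1, 2, 3):
--         if pos < len(GRAPHS[graph_idx]):
--             new_horse = pos, graph_idx
--         else:
--             pos -= len(GRAPHS[graph_idx])
--             new_horse = normalize_pos(pos, 4)
--     else:  # graph_idx == 4
--         if pos < len(GRAPHS[4]):
--             new_horse = pos, 4
--         else:
--             pos = 20 + pos - len(GRAPHS[4])
--             new_horse = normalize_pos(pos, 0)
--     return new_horse
-- ===== SOURCE B (Python) =====
-- def normalize_pos(pos, graph_idx):
--     # Flattened cascade with early returns: the recursion of A has depth at most 2,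
--     # so handle the side-segment (1/2/3), then segment 4, then the terminal graph-0 rules.
--     if graph_idx in (1, 2, 3):
--         n = 3 if graph_idx == 2 else 4
--         if pos < n:
--             return pos, graph_idx
--         pos -= n
--         graph_idx = 4
--     if graph_idx != 0:
--         if pos < 3:
--             return pos, 4
--         pos += 17
--     if pos == 5:
--         return 0, 1
--     if pos == 10:
--         return 0, 2
--     if pos == 15:
--         return 0, 3
--     if pos >= 21:
--         return 21, 0
--     return pos, 0
-- ===== Notes on version B (the rewrite author's own statement) =====
-- stated objective: simpler
-- what changed: Replaces A's recursion and dict lookup with a flattened straight-line cascade of early returns (side segment, then segment 4, then the terminal graph-0 rules), exploiting that the recursion depth is at most 2.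
import Mathlib
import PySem

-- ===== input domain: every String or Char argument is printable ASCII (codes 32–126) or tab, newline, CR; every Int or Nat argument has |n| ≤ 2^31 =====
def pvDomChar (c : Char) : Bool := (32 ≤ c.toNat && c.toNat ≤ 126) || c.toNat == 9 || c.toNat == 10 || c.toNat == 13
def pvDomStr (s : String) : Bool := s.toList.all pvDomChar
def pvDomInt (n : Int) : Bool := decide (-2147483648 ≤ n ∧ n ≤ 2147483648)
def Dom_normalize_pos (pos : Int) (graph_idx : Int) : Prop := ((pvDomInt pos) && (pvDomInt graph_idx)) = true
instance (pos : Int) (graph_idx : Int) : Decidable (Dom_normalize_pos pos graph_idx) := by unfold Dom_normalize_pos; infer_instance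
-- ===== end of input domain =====

-- B replaces A's recursion and dict lookup with a flattened straight-line cascade of early returns (simpler; same cost).

-- ===== PORT A =====
def GRAPHS : List (List Int) :=
  [[0, 2, 4, 6, 8, 10, 12, 14, 16, 18, 20, 22, 24, 26, 28, 30, 32, 34, 36, 38, 40, 0],
   [10, 13, 16, 19],
   [20, 22, 24],
   [30, 28, 27, 26],
   [25, 30, 35]]

def normalize_pos (pos : Int) (graph_idx : Int) : Int × Int :=
  if graph_idx = 0 then
    if pos = 5 ∨ pos = 10 ∨ pos = 15 then
      -- `{5: 1, 10: 2, 15: 3}[pos]`; the key is present under the guard, so `.getD 0` is exact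
      (0, (PySem.Dict.get? (PySem.Dict.ofList ([(5, 1), (10, 2), (15, 3)] : List (Int × Int))) pos).getD 0)
    else if 21 ≤ pos then (21, 0)
    else (pos, 0)
  else if graph_idx = 1 ∨ graph_idx = 2 ∨ graph_idx = 3 then
    let n : Int := ((PySem.List.pyGet? GRAPHS graph_idx).getD []).length
    if pos < n then (pos, graph_idx)
    else normalize_pos (pos - n) 4
  else
    let n4 : Int := ((PySem.List.pyGet? GRAPHS 4).getD []).length
    if pos < n4 then (pos, 4)
    else normalize_pos (20 + pos - n4) 0
termination_by (if graph_idx = 0 then 0 else if graph_idx = 1 ∨ graph_idx = 2 ∨ graph_idx = 3 then 2 else 1 : Nat)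
decreasing_by
  · simp_all
  · simp_all

-- ===== PORT B =====
-- terminal graph-0 rules (the tail of Source B after both segment stages)
def altTerminal (pos : Int) : Int × Int :=
  if pos = 5 then (0, 1)
  else if pos = 10 then (0, 2)
  else if pos = 15 then (0, 3)
  else if 21 ≤ pos then (21, 0)
  else (pos, 0)

-- second stage of Source B: segment 4 (any non-zero graph index reaching here)
def altStage2 (pos : Int) (graph_idx : Int) : Int × Int :=
  if graph_idx ≠ 0 then
    if pos < 3 then (pos, 4)
    else altTerminal (pos + 17)
  else altTerminal pos

def normalize_pos_alt (pos : Int) (graph_idx : Int) : Int × Int :=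
  if graph_idx = 1 ∨ graph_idx = 2 ∨ graph_idx = 3 then
    let n : Int := if graph_idx = 2 then 3 else 4
    if pos < n then (pos, graph_idx)
    else altStage2 (pos - n) 4
  else altStage2 pos graph_idx

-- ===== PRECONDITION & SPEC =====
def Spec_normalize_pos (pos : Int) (graph_idx : Int) (out : Int × Int) : Prop := out = normalize_pos_alt pos graph_idx
instance (pos : Int) (graph_idx : Int) (out : Int × Int) : Decidable (Spec_normalize_pos pos graph_idx out) := by unfold Spec_normalize_pos; infer_instance

-- ===== CLAIM (what is proved, stated in full; the proofs are below) =====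
def Claim_equal_normalize_pos : Prop := ∀ (pos : Int) (graph_idx : Int), Dom_normalize_pos pos graph_idx → Spec_normalize_pos pos graph_idx (normalize_pos pos graph_idx)

-- ===== LEMMAS AND PROOFS =====

lemma A_graph_zero (pos : Int) : normalize_pos pos 0 = altTerminal pos := by
  rw [normalize_pos]
  unfold altTerminal
  by_cases h5 : pos = 5
  · subst h5; simp; decide
  by_cases h10 : pos = 10
  · subst h10; simp; decide
  by_cases h15 : pos = 15
  · subst h15; simp; decide
  simp [h5, h10, h15]

lemma A_graph_four (pos : Int) : normalize_pos pos 4 = altStage2 pos 4 := by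
  rw [normalize_pos]
  unfold altStage2
  have hlen : ((PySem.List.pyGet? GRAPHS 4).getD []).length = 3 := by decide
  simp only [hlen]
  norm_num
  by_cases h : pos < 3
  · simp [h]
  · simp [h, A_graph_zero]
    have : 20 + pos - 3 = pos + 17 := by ring
    rw [this]

theorem normalize_pos_eq (pos graph_idx : Int) :
    normalize_pos pos graph_idx = normalize_pos_alt pos graph_idx := by
  by_cases h0 : graph_idx = 0
  · subst h0
    simp [normalize_pos_alt, altStage2, A_graph_zero]
  by_cases h1 : graph_idx = 1
  · subst h1
    rw [normalize_pos]
    simp [normalize_pos_alt]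
    have hlen : ((PySem.List.pyGet? GRAPHS 1).getD []).length = 4 := by decide
    simp only [hlen]
    norm_num
    by_cases h : pos < 4
    · simp [h]
    · simp [h, A_graph_four]
  by_cases h2 : graph_idx = 2
  · subst h2
    rw [normalize_pos]
    simp [normalize_pos_alt]
    have hlen : ((PySem.List.pyGet? GRAPHS 2).getD []).length = 3 := by decide
    simp only [hlen]
    norm_num
    by_cases h : pos < 3
    · simp [h]
    · simp [h, A_graph_four]
  by_cases h3 : graph_idx = 3
  · subst h3
    rw [normalize_pos]
    simp [normalize_pos_alt]
    have hlen : ((PySem.List.pyGet? GRAPHS 3).getD []).length = 4 := by decide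
    simp only [hlen]
    norm_num
    by_cases h : pos < 4
    · simp [h]
    · simp [h, A_graph_four]
  · rw [normalize_pos]
    simp [normalize_pos_alt, h0, h1, h2, h3, altStage2]
    have hlen : ((PySem.List.pyGet? GRAPHS 4).getD []).length = 3 := by decide
    simp only [hlen]
    norm_num
    by_cases h : pos < 3
    · simp [h]
    · simp [h, A_graph_zero]
      have : 20 + pos - 3 = pos + 17 := by ring
      rw [this]

-- ===== VERDICT (by name: the statement is the Claim_ definition above) =====
theorem normalize_pos_spec : Claim_equal_normalize_pos := by
  intro pos graph_idx _
  unfold Spec_normalize_pos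
  exact normalize_pos_eq pos graph_idx
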